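-- pv_equiv track=rewrite | github.com/UCA-Datalab/nilm-thresholding | better_nilm/ukdale/ukdale_data.py | _buildings_to_idx
-- ===== SOURCE A (Python) =====
-- def _buildings_to_idx(buildings, build_id_train, build_id_valid,
--                       build_id_test):
--     """
--     Takes the list of buildings ID and changes them to their corresponding
--     index.
--
--     Parameters
--     ----------
--     buildings
--     build_id_train
--     build_id_valid
--     build_id_test
--
--     Returns
--     -------
--     build_idx_train
--     build_idx_valid
--     build_idx_test
--
--     """
--     # Train, valid and test buildings must contain the index, not the ID of
--     # the building. Change that
--     if build_id_train is None:
--         build_idx_train = [i for i in range(len(buildings))]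
--     else:
--         build_idx_train = []
--
--     if build_id_valid is None:
--         build_idx_valid = [i for i in range(len(buildings))]
--     else:
--         build_idx_valid = []
--
--     if build_id_test is None:
--         build_idx_test = [i for i in range(len(buildings))]
--     else:
--         build_idx_test = []
--
--     for idx, building in enumerate(buildings):
--         if (build_id_train is not None) and (building in build_id_train):
--             build_idx_train += [idx]
--         if (build_id_valid is not None) and (building in build_id_valid):
--             build_idx_valid += [idx]
--         if (build_id_test is not None) and (building in build_id_test):
--             build_idx_test += [idx]
--
--     assert len(build_idx_train) > 0, f"No ID in build_id_train matches the " \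
--                                      f"ones of buildings."
--     assert len(build_idx_valid) > 0, f"No ID in build_id_valid matches the " \
--                                      f"ones of buildings."
--     assert len(build_idx_test) > 0, f"No ID in build_id_test matches the " \
--                                     f"ones of buildings."
--
--     return build_idx_train, build_idx_valid, build_idx_test
-- ===== SOURCE B (Python) =====
-- def _buildings_to_idx(buildings, build_id_train, build_id_valid,
--                       build_id_test):
--     # Index the buildings once: id -> list of positions where it occurs.
--     pos = {}
--     for i, b in enumerate(buildings):
--         pos.setdefault(b, []).append(i)
--
--     def split_idx(build_id):
--         if build_id is None:
--             return list(range(len(buildings)))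
--         hits = set()
--         for bid in build_id:
--             hits.update(pos.get(bid, []))
--         return sorted(hits)
--
--     build_idx_train = split_idx(build_id_train)
--     build_idx_valid = split_idx(build_id_valid)
--     build_idx_test = split_idx(build_id_test)
--
--     assert len(build_idx_train) > 0, f"No ID in build_id_train matches the " \
--                                      f"ones of buildings."
--     assert len(build_idx_valid) > 0, f"No ID in build_id_valid matches the " \
--                                      f"ones of buildings."
--     assert len(build_idx_test) > 0, f"No ID in build_id_test matches the " \
--                                     f"ones of buildings."
--
--     return build_idx_train, build_idx_valid, build_idx_test
-- ===== Notes on version B (the rewrite author's own statement) =====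
-- stated objective: alternative
-- what changed: B replaces A's per-building membership tests against each id list by an inverted index built once (dict id -> positions), then gathers each split as the sorted set-union of the positions of its ids; correct because A's output is exactly the distinct matching positions in increasing order.
import Mathlib
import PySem

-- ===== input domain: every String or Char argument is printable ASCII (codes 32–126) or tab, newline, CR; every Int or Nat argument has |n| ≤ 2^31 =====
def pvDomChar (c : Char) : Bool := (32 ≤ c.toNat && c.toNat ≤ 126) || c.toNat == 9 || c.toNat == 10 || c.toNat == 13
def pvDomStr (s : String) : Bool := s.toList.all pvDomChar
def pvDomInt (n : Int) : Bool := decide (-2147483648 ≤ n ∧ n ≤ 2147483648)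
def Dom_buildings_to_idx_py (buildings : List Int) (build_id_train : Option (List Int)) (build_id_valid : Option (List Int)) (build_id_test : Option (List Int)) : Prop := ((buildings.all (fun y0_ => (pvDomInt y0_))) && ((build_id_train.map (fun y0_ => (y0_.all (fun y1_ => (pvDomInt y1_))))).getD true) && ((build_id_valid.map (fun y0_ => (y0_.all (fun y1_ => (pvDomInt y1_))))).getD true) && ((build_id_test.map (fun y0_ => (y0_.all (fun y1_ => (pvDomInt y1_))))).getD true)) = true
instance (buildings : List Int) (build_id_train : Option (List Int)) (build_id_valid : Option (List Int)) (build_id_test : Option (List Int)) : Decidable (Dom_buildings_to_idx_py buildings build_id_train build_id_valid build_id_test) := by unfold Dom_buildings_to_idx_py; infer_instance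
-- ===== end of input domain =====

-- B replaces A's per-building membership tests by an inverted index (id -> positions) built once,
-- then gathers each split as the sorted set-union of the positions of its ids (objective: alternative).

-- ===== PORT A =====
-- one step of A's for-loop over enumerate(buildings): update the three accumulators in order
def pvStepA (bt bv bte : Option (List Int)) (acc : List Int × List Int × List Int) (p : Int × Int) : List Int × List Int × List Int :=
  let a1 := match bt with | some l => if p.2 ∈ l then acc.1 ++ [p.1] else acc.1 | none => acc.1
  let a2 := match bv with | some l => if p.2 ∈ l then acc.2.1 ++ [p.1] else acc.2.1 | none => acc.2.1
  let a3 := match bte with | some l => if p.2 ∈ l then acc.2.2 ++ [p.1] else acc.2.2 | none => acc.2.2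
  (a1, a2, a3)

def buildings_to_idx_py (buildings : List Int) (build_id_train : Option (List Int)) (build_id_valid : Option (List Int)) (build_id_test : Option (List Int)) : List Int × List Int × List Int :=
  let init_t : List Int := match build_id_train with | none => PySem.List.pyRange 0 buildings.length 1 | some _ => []
  let init_v : List Int := match build_id_valid with | none => PySem.List.pyRange 0 buildings.length 1 | some _ => []
  let init_te : List Int := match build_id_test with | none => PySem.List.pyRange 0 buildings.length 1 | some _ => []
  (PySem.List.enumerate buildings 0).foldl (pvStepA build_id_train build_id_valid build_id_test) (init_t, init_v, init_te)

-- ===== PORT B =====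
-- pos = {}; for i, b in enumerate(buildings): pos.setdefault(b, []).append(i)
def pvPos (buildings : List Int) : PySem.Dict Int (List Int) :=
  (PySem.List.enumerate buildings 0).foldl
    (fun d p => PySem.Dict.modify d p.2 [] (fun ixs => ixs ++ [p.1])) PySem.Dict.empty

-- split_idx: None -> range(len); else sorted set-union of pos.get(bid, []) over bid in build_id
def pvSplitIdx (buildings : List Int) (pos : PySem.Dict Int (List Int)) (o : Option (List Int)) : List Int :=
  match o with
  | none => PySem.List.pyRange 0 buildings.length 1
  | some l =>
      let hits : PySem.Set Int := l.foldl (fun s bid => PySem.Set.update s (pos.getD bid [])) PySem.Set.empty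
      PySem.List.sorted hits (fun x => x) false

def buildings_to_idx_py_alt (buildings : List Int) (build_id_train : Option (List Int)) (build_id_valid : Option (List Int)) (build_id_test : Option (List Int)) : List Int × List Int × List Int :=
  let pos := pvPos buildings
  (pvSplitIdx buildings pos build_id_train, pvSplitIdx buildings pos build_id_valid, pvSplitIdx buildings pos build_id_test)

-- ===== PRECONDITION & SPEC =====
-- Pre_ excludes exactly the inputs where one of A's three asserts fails (AssertionError): a split
-- given as None with empty buildings, or a given id list matching no building.
def pvSplitOK (buildings : List Int) (o : Option (List Int)) : Bool :=
  match o with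
  | none => !buildings.isEmpty
  | some l => buildings.any (fun b => l.contains b)

def Pre_buildings_to_idx_py (buildings : List Int) (build_id_train : Option (List Int)) (build_id_valid : Option (List Int)) (build_id_test : Option (List Int)) : Prop :=
  pvSplitOK buildings build_id_train ∧ pvSplitOK buildings build_id_valid ∧ pvSplitOK buildings build_id_test
instance (buildings : List Int) (build_id_train : Option (List Int)) (build_id_valid : Option (List Int)) (build_id_test : Option (List Int)) : Decidable (Pre_buildings_to_idx_py buildings build_id_train build_id_valid build_id_test) := by unfold Pre_buildings_to_idx_py; infer_instance

def pvWitness_buildings_to_idx_py : List Int × Option (List Int) × Option (List Int) × Option (List Int) := ([1, 2], some [1], some [2], none)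

def Spec_buildings_to_idx_py (buildings : List Int) (build_id_train : Option (List Int)) (build_id_valid : Option (List Int)) (build_id_test : Option (List Int)) (out : List Int × List Int × List Int) : Prop := out = buildings_to_idx_py_alt buildings build_id_train build_id_valid build_id_test
instance (buildings : List Int) (build_id_train : Option (List Int)) (build_id_valid : Option (List Int)) (build_id_test : Option (List Int)) (out : List Int × List Int × List Int) : Decidable (Spec_buildings_to_idx_py buildings build_id_train build_id_valid build_id_test out) := by unfold Spec_buildings_to_idx_py; infer_instance

-- ===== CLAIM (what is proved, stated in full; the proofs are below) =====
def Claim_equal_buildings_to_idx_py : Prop := ∀ (buildings : List Int) (build_id_train : Option (List Int)) (build_id_valid : Option (List Int)) (build_id_test : Option (List Int)), Dom_buildings_to_idx_py buildings build_id_train build_id_valid build_id_test → Pre_buildings_to_idx_py buildings build_id_train build_id_valid build_id_test → Spec_buildings_to_idx_py buildings build_id_train build_id_valid build_id_test (buildings_to_idx_py buildings build_id_train build_id_valid build_id_test)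

-- ===== LEMMAS AND PROOFS =====
-- what each option contributes during A's loop over a list of (idx, building) pairs
def pvContrib (o : Option (List Int)) (ps : List (Int × Int)) : List Int :=
  match o with
  | none => []
  | some l => ps.filterMap (fun p => if p.2 ∈ l then some p.1 else none)

theorem foldA_eq (bt bv bte : Option (List Int)) (ps : List (Int × Int)) (a1 a2 a3 : List Int) :
    ps.foldl (pvStepA bt bv bte) (a1, a2, a3) =
      (a1 ++ pvContrib bt ps, a2 ++ pvContrib bv ps, a3 ++ pvContrib bte ps) := by
  induction ps generalizing a1 a2 a3 with
  | nil => cases bt <;> cases bv <;> cases bte <;> simp [pvContrib]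
  | cons p ps ih =>
      simp only [List.foldl_cons, pvStepA, ih]
      cases bt <;> cases bv <;> cases bte <;>
        simp [pvContrib, List.filterMap_cons] <;> split_ifs <;> simp_all

-- the inverted index: pos[b] is the list of positions of b, in order
theorem getD_foldl_modify (ps : List (Int × Int)) (d : PySem.Dict Int (List Int)) (b : Int) :
    (ps.foldl (fun d p => PySem.Dict.modify d p.2 [] (fun ixs => ixs ++ [p.1])) d).getD b [] =
      d.getD b [] ++ ps.filterMap (fun p => if p.2 = b then some p.1 else none) := by
  induction ps generalizing d with
  | nil => simp
  | cons p ps ih =>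
      simp only [List.foldl_cons, ih, List.filterMap_cons]
      by_cases h : p.2 = b
      · subst h
        rw [PySem.Dict.getD_modify_self]
        simp
      · rw [PySem.Dict.getD_modify_of_ne d [] _ (fun hb => h hb.symm)]
        simp [h]

theorem mem_getD_pvPos (buildings : List Int) (b i : Int) :
    i ∈ (pvPos buildings).getD b [] ↔ (i, b) ∈ PySem.List.enumerate buildings 0 := by
  unfold pvPos
  rw [getD_foldl_modify]
  have hemp : (PySem.Dict.empty : PySem.Dict Int (List Int)).getD b [] = [] := rfl
  rw [hemp, List.nil_append, List.mem_filterMap]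
  constructor
  · rintro ⟨⟨j, c⟩, hp, h⟩
    by_cases hb : c = b
    · subst hb
      simp only [if_true, Option.some.injEq] at h
      subst h
      exact hp
    · simp [hb] at h
  · intro h
    exact ⟨(i, b), h, by simp⟩

-- membership in the union-of-positions set built by B's inner loop
theorem mem_hits (l : List Int) (pos : PySem.Dict Int (List Int)) (s : PySem.Set Int) (y : Int) :
    y ∈ l.foldl (fun s bid => PySem.Set.update s (pos.getD bid [])) s ↔
      y ∈ s ∨ ∃ bid ∈ l, y ∈ pos.getD bid [] := by
  induction l generalizing s with
  | nil => simp
  | cons bid l ih =>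
      simp only [List.foldl_cons, ih, PySem.Set.mem_update, List.mem_cons]
      constructor
      · rintro (⟨h | h⟩ | ⟨b, hb, h⟩)
        · exact Or.inl h
        · exact Or.inr ⟨bid, Or.inl rfl, h⟩
        · exact Or.inr ⟨b, Or.inr hb, h⟩
      · rintro (h | ⟨b, (rfl | hb), h⟩)
        · exact Or.inl (Or.inl h)
        · exact Or.inl (Or.inr h)
        · exact Or.inr ⟨b, hb, h⟩

theorem nodup_hits (l : List Int) (pos : PySem.Dict Int (List Int)) (s : PySem.Set Int)
    (hs : s.Nodup) : (l.foldl (fun s bid => PySem.Set.update s (pos.getD bid [])) s).Nodup := by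
  induction l generalizing s with
  | nil => exact hs
  | cons bid l ih => exact ih _ (PySem.Set.nodup_update s _ hs)

-- the first components of enumerate are strictly increasing
theorem pairwise_fst_enumerate {α : Type} (xs : List α) (s : Int) :
    (PySem.List.enumerate xs s).Pairwise (fun p q => p.1 < q.1) := by
  induction xs generalizing s with
  | nil => simp [PySem.List.enumerate_nil]
  | cons x xs ih =>
      rw [PySem.List.enumerate_cons]
      refine List.Pairwise.cons ?_ (ih (s + 1))
      intro q hq
      have h1 : q.1 ∈ (PySem.List.enumerate xs (s + 1)).map (·.1) := List.mem_map_of_mem hq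
      rw [PySem.List.map_fst_enumerate] at h1
      have := PySem.List.mem_pyRange_one.1 h1
      omega

-- filterMap of the first components preserves strict increase of the first components
theorem pairwise_filterMap_fst (l : List Int) (ps : List (Int × Int))
    (h : ps.Pairwise (fun p q => p.1 < q.1)) :
    (ps.filterMap (fun p => if p.2 ∈ l then some p.1 else none)).Pairwise (· < ·) := by
  induction h with
  | nil => simp
  | cons hp _ ihp =>
      rename_i p ps _
      rw [List.filterMap_cons]
      by_cases hc : p.2 ∈ l
      · rw [if_pos hc]
        refine List.Pairwise.cons ?_ ihp
        intro y hy
        rcases List.mem_filterMap.1 hy with ⟨q, hq, hfy⟩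
        by_cases hqc : q.2 ∈ l
        · rw [if_pos hqc, Option.some.injEq] at hfy
          exact hfy ▸ hp q hq
        · rw [if_neg hqc] at hfy; cases hfy
      · rw [if_neg hc]; exact ihp

-- A's per-split contribution is strictly increasing
theorem pairwise_contrib (buildings : List Int) (l : List Int) :
    ((PySem.List.enumerate buildings 0).filterMap
      (fun p => if p.2 ∈ l then some p.1 else none)).Pairwise (· < ·) :=
  pairwise_filterMap_fst l _ (pairwise_fst_enumerate buildings 0)

-- B's sorted set-union equals A's in-order contribution (the 'some' case)
theorem split_some_eq (buildings l : List Int) :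
    pvSplitIdx buildings (pvPos buildings) (some l) = pvContrib (some l) (PySem.List.enumerate buildings 0) := by
  unfold pvSplitIdx pvContrib
  apply PySem.List.sorted_eq_of_perm_of_pairwise_lt
  · rw [List.perm_ext_iff_of_nodup]
    · intro i
      rw [mem_hits, List.mem_filterMap]
      simp only [PySem.Set.empty, List.not_mem_nil, false_or]
      constructor
      · rintro ⟨p, hp, h⟩
        split at h
        · cases h; rename_i hmem; exact ⟨p.2, hmem, (mem_getD_pvPos _ _ _).2 hp⟩
        · cases h
      · rintro ⟨bid, hbid, h⟩
        exact ⟨(i, bid), (mem_getD_pvPos _ _ _).1 h, by simp [hbid]⟩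
    · exact (pairwise_contrib buildings l).imp ne_of_lt
    · exact nodup_hits _ _ _ (by simp [PySem.Set.empty])
  · exact pairwise_contrib buildings l

theorem split_eq (buildings : List Int) (o : Option (List Int)) :
    pvSplitIdx buildings (pvPos buildings) o =
      (match o with | none => PySem.List.pyRange 0 buildings.length 1 | some _ => []) ++
        pvContrib o (PySem.List.enumerate buildings 0) := by
  cases o with
  | none => simp [pvSplitIdx, pvContrib]
  | some l => simpa using split_some_eq buildings l

-- ===== VERDICT (by name: the statement is the Claim_ definition above) =====
theorem buildings_to_idx_py_spec : Claim_equal_buildings_to_idx_py := by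
  intro buildings bt bv bte _ _
  unfold Spec_buildings_to_idx_py buildings_to_idx_py buildings_to_idx_py_alt
  simp only [foldA_eq, split_eq]
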